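-- pv_equiv track=rewrite | github.com/behnaz987/DataMining-1 | src/question4/eclat.py | convert_horizontal_to_vertical
-- ===== SOURCE A (Python) =====
-- def convert_horizontal_to_vertical(transactions_items, number_of_transactions):
--     id = 0
--     item_id = {}
--     for transaction in transactions_items:
--         for item in transaction:
--             if item not in item_id:
--                 item_id[item] = id
--                 id += 1
--     keys = item_id.keys()
--     values = item_id.values()
--     id_item = dict(zip(values, keys))
--
--     vertical_data = dict()
--     for id in item_id.values():
--         item_transactions = [0] * number_of_transactions
--         vertical_data[id] = item_transactions
--     for transaction_id, transaction in enumerate(transactions_items):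
--         for item in transaction:
--             vertical_data[item_id[item]][transaction_id] = 1
--     return vertical_data, id_item
-- ===== SOURCE B (Python) =====
-- def convert_horizontal_to_vertical(transactions_items, number_of_transactions):
--     # single interleaved pass: assign ids, build both maps and the bitvectors as items are first seen
--     item_id = {}
--     id_item = {}
--     vertical_data = {}
--     next_id = 0
--     for transaction_id, transaction in enumerate(transactions_items):
--         for item in transaction:
--             if item not in item_id:
--                 item_id[item] = next_id
--                 id_item[next_id] = item
--                 vertical_data[next_id] = [0] * number_of_transactions
--                 next_id += 1
--             vertical_data[item_id[item]][transaction_id] = 1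
--     return vertical_data, id_item
-- ===== Notes on version B (the rewrite author's own statement) =====
-- stated objective: simpler
-- what changed: A's four sequenced passes (assign ids, zip keys/values into the reverse map, allocate all zero rows, then re-scan all transactions to set bits) are merged into one interleaved first-seen pass that builds item_id, id_item and the bit rows as each item is encountered.
import Mathlib
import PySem

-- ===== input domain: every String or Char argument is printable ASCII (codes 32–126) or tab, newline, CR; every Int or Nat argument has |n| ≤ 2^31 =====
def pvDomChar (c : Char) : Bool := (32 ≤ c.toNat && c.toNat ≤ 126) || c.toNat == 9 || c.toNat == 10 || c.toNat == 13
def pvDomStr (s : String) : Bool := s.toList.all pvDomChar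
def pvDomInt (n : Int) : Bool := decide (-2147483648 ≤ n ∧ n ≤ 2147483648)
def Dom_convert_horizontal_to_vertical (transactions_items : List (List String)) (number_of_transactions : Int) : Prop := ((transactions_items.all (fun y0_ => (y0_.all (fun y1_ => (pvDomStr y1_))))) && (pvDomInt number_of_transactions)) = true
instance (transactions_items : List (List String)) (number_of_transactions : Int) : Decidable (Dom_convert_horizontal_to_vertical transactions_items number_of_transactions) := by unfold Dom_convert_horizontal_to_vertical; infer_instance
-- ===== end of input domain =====

-- B merges A's four sequenced loops into one interleaved first-seen pass (objective: simpler single-pass decomposition; not claimed faster).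
-- Both Pythons mutate their own fresh lists only; the input is not mutated.

-- ===== PORT A =====
def convert_horizontal_to_vertical (transactions_items : List (List String)) (number_of_transactions : Int) : (List (Int × List Int)) × (List (Int × String)) :=
  -- first loop pair: assign ids by first occurrence
  let item_id : PySem.Dict String Int :=
    (transactions_items.foldl
      (fun (st : PySem.Dict String Int × Int) transaction =>
        transaction.foldl
          (fun st item => if st.1.contains item then st else (st.1.insert item st.2, st.2 + 1)) st)
      (PySem.Dict.empty, 0)).1
  -- id_item = dict(zip(values, keys))
  let id_item : PySem.Dict Int String :=
    (item_id.values.zip item_id.keys).foldl (fun d p => d.insert p.1 p.2) PySem.Dict.empty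
  -- vertical_data[id] = [0] * number_of_transactions  ([0]*n is [] for n ≤ 0, hence .toNat)
  let vertical_data0 : PySem.Dict Int (List Int) :=
    item_id.values.foldl (fun d id => d.insert id (List.replicate number_of_transactions.toNat 0)) PySem.Dict.empty
  -- fill loop: vertical_data[item_id[item]][transaction_id] = 1 (in range under Pre_)
  let vertical_data : PySem.Dict Int (List Int) :=
    (PySem.List.enumerate transactions_items 0).foldl
      (fun vd p => p.2.foldl
        (fun vd item => vd.modify (item_id.getD item 0) [] (fun l => PySem.List.pySetD l p.1 1)) vd)
      vertical_data0
  (vertical_data.items, id_item.items)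

-- ===== PORT B =====
-- state: (item_id, id_item, vertical_data, next_id)
def convert_horizontal_to_vertical_alt (transactions_items : List (List String)) (number_of_transactions : Int) : (List (Int × List Int)) × (List (Int × String)) :=
  let st :=
    (PySem.List.enumerate transactions_items 0).foldl
      (fun (st : PySem.Dict String Int × PySem.Dict Int String × PySem.Dict Int (List Int) × Int) p =>
        p.2.foldl
          (fun st item =>
            let st' :=
              if st.1.contains item then st
              else (st.1.insert item st.2.2.2, st.2.1.insert st.2.2.2 item,
                    st.2.2.1.insert st.2.2.2 (List.replicate number_of_transactions.toNat 0), st.2.2.2 + 1)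
            (st'.1, st'.2.1, st'.2.2.1.modify (st'.1.getD item 0) [] (fun l => PySem.List.pySetD l p.1 1), st'.2.2.2))
          st)
      (PySem.Dict.empty, PySem.Dict.empty, PySem.Dict.empty, 0)
  (st.2.2.1.items, st.2.1.items)

-- ===== PRECONDITION & SPEC =====
-- Pre_ excludes exactly the inputs where Python A raises IndexError: a non-empty transaction whose
-- index is ≥ number_of_transactions (its bit-row is too short to be written).  Python B raises identically there.
def Pre_convert_horizontal_to_vertical (transactions_items : List (List String)) (number_of_transactions : Int) : Prop :=
  ((PySem.List.enumerate transactions_items 0).all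
    (fun p => p.2.isEmpty || decide (p.1 < number_of_transactions))) = true
instance (transactions_items : List (List String)) (number_of_transactions : Int) : Decidable (Pre_convert_horizontal_to_vertical transactions_items number_of_transactions) := by unfold Pre_convert_horizontal_to_vertical; infer_instance
def pvWitness_convert_horizontal_to_vertical : List (List String) × Int := ([["a","b"],["b"],[],["a","c"]], 4)

def Spec_convert_horizontal_to_vertical (transactions_items : List (List String)) (number_of_transactions : Int) (out : (List (Int × List Int)) × (List (Int × String))) : Prop := out = convert_horizontal_to_vertical_alt transactions_items number_of_transactions
instance (transactions_items : List (List String)) (number_of_transactions : Int) (out : (List (Int × List Int)) × (List (Int × String))) : Decidable (Spec_convert_horizontal_to_vertical transactions_items number_of_transactions out) := by unfold Spec_convert_horizontal_to_vertical; infer_instance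

-- ===== CLAIM (what is proved, stated in full; the proofs are below) =====
def Claim_equal_convert_horizontal_to_vertical : Prop := ∀ (transactions_items : List (List String)) (number_of_transactions : Int), Dom_convert_horizontal_to_vertical transactions_items number_of_transactions → Pre_convert_horizontal_to_vertical transactions_items number_of_transactions → Spec_convert_horizontal_to_vertical transactions_items number_of_transactions (convert_horizontal_to_vertical transactions_items number_of_transactions)

-- ===== LEMMAS AND PROOFS =====

-- the flattened stream of (transaction_id, item) pairs both programs process
def pvFlat (tss : List (List String)) : List (Int × String) :=
  (PySem.List.enumerate tss 0).flatMap (fun p => p.2.map (fun it => (p.1, it)))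

-- A's id-assignment step, as a function of one flat pair's item
def pvBStep (st : PySem.Dict String Int × Int) (item : String) : PySem.Dict String Int × Int :=
  if st.1.contains item then st else (st.1.insert item st.2, st.2 + 1)

def pvBFold (ps : List (Int × String)) : PySem.Dict String Int × Int :=
  ps.foldl (fun st p => pvBStep st p.2) (PySem.Dict.empty, 0)

def pvMkIdItem (iid : PySem.Dict String Int) : PySem.Dict Int String :=
  (iid.values.zip iid.keys).foldl (fun d p => d.insert p.1 p.2) PySem.Dict.empty

def pvMkInit (iid : PySem.Dict String Int) (n : Int) : PySem.Dict Int (List Int) :=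
  iid.values.foldl (fun d id => d.insert id (List.replicate n.toNat 0)) PySem.Dict.empty

def pvFill (iid : PySem.Dict String Int) (ps : List (Int × String)) (vd : PySem.Dict Int (List Int)) : PySem.Dict Int (List Int) :=
  ps.foldl (fun vd p => vd.modify (iid.getD p.2 0) [] (fun l => PySem.List.pySetD l p.1 1)) vd

-- B's combined step on one flat pair
def pvCStep (n : Int) (st : PySem.Dict String Int × PySem.Dict Int String × PySem.Dict Int (List Int) × Int) (p : Int × String) : PySem.Dict String Int × PySem.Dict Int String × PySem.Dict Int (List Int) × Int :=
  let st' :=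
    if st.1.contains p.2 then st
    else (st.1.insert p.2 st.2.2.2, st.2.1.insert st.2.2.2 p.2,
          st.2.2.1.insert st.2.2.2 (List.replicate n.toNat 0), st.2.2.2 + 1)
  (st'.1, st'.2.1, st'.2.2.1.modify (st'.1.getD p.2 0) [] (fun l => PySem.List.pySetD l p.1 1), st'.2.2.2)

def pvCFold (n : Int) (ps : List (Int × String)) : PySem.Dict String Int × PySem.Dict Int String × PySem.Dict Int (List Int) × Int :=
  ps.foldl (pvCStep n) (PySem.Dict.empty, PySem.Dict.empty, PySem.Dict.empty, 0)

-- a nested (enumerate, inner items) loop is the fold over the flat pair stream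
theorem pv_nested_eq_flat {σ : Type} (f : σ → Int × String → σ) (tss : List (List String)) (init : σ) :
    (PySem.List.enumerate tss 0).foldl (fun st p => p.2.foldl (fun st it => f st (p.1, it)) st) init
      = (pvFlat tss).foldl f init := by
  rw [pvFlat, List.foldl_flatMap]
  simp only [List.foldl_map]

-- a loop over the transactions ignoring the index is the same fold over the flat stream
theorem pv_build_eq_flat {σ : Type} (g : σ → String → σ) (tss : List (List String)) (init : σ) :
    tss.foldl (fun st ts => ts.foldl g st) init
      = (pvFlat tss).foldl (fun st p => g st p.2) init := by
  conv_lhs => rw [← PySem.List.map_snd_enumerate tss 0]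
  rw [List.foldl_map]
  exact pv_nested_eq_flat (fun st p => g st p.2) tss init

-- invariants of A's id-assignment fold: every processed item is a key, every id value is < next_id
theorem pvBFold_step (ps : List (Int × String)) (q : Int × String) :
    pvBFold (ps ++ [q]) = pvBStep (pvBFold ps) q.2 := by
  simp [pvBFold, List.foldl_append]

theorem pvBFold_inv (ps : List (Int × String)) :
    (∀ p ∈ ps, (pvBFold ps).1.contains p.2 = true) ∧
    (∀ v ∈ (pvBFold ps).1.values, v < (pvBFold ps).2) := by
  induction ps using List.reverseRecOn with
  | nil =>
    constructor
    · intro p hp; simp at hp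
    · intro v hv; simp [pvBFold, PySem.Dict.empty, PySem.Dict.values] at hv
  | append_singleton ps q ih =>
    obtain ⟨ih1, ih2⟩ := ih
    by_cases hcont : (pvBFold ps).1.contains q.2 = true
    · have hb : pvBFold (ps ++ [q]) = pvBFold ps := by
        rw [pvBFold_step]; simp [pvBStep, hcont]
      rw [hb]
      refine ⟨fun p hp => ?_, ih2⟩
      rcases List.mem_append.mp hp with h | h
      · exact ih1 p h
      · simp at h; rw [h]; exact hcont
    · have hfalse : (pvBFold ps).1.contains q.2 = false := by simpa using hcont
      have hb : pvBFold (ps ++ [q]) =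
          ((pvBFold ps).1.insert q.2 (pvBFold ps).2, (pvBFold ps).2 + 1) := by
        rw [pvBFold_step]; simp [pvBStep, hfalse]
      rw [hb]
      have hitems : ((pvBFold ps).1.insert q.2 (pvBFold ps).2).items
          = (pvBFold ps).1.items ++ [(q.2, (pvBFold ps).2)] :=
        PySem.Dict.items_insert_of_not_contains _ _ hfalse
      constructor
      · intro p hp
        rcases List.mem_append.mp hp with h | h
        · rw [PySem.Dict.contains_insert]; simp [ih1 p h]
        · simp at h; rw [h]; exact PySem.Dict.contains_insert_self _ _ _
      · intro v hv
        simp only [PySem.Dict.values, hitems, List.map_append, List.map_cons, List.map_nil,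
          List.mem_append, List.mem_cons, List.not_mem_nil, or_false] at hv
        rcases hv with h | h
        · have := ih2 v (by simpa [PySem.Dict.values] using h); omega
        · omega

-- a value looked up at a present key is a member of d.values
theorem pv_getD_mem_values {κ ν : Type} [BEq κ] [LawfulBEq κ] (d : PySem.Dict κ ν) (k : κ) (d0 : ν)
    (h : d.contains k = true) : d.getD k d0 ∈ d.values := by
  rw [PySem.Dict.contains_eq_isSome_get?] at h
  obtain ⟨v, hv⟩ := Option.isSome_iff_exists.mp h
  rw [PySem.Dict.getD_of_get?_eq_some d d0 hv]
  exact List.mem_map_of_mem (f := fun p => p.2) (PySem.Dict.mem_items_of_get?_eq_some d hv)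

-- modify at a present key commutes with appending a fresh key
theorem pv_modify_insert_comm {κ ν : Type} [BEq κ] [LawfulBEq κ] (d : PySem.Dict κ ν) (k c : κ) (v d0 : ν) (f : ν → ν)
    (hk : d.contains k = true) (hc : d.contains c = false) (hne : k ≠ c) :
    (d.insert c v).modify k d0 f = (d.modify k d0 f).insert c v := by
  simp only [PySem.Dict.modify]
  rw [PySem.Dict.getD_insert_of_ne d v d0 hne]
  apply PySem.Dict.ext
  have h1 : (d.insert c v).contains k = true := by
    rw [PySem.Dict.contains_insert]; simp [hk]
  have h2 : (d.insert k (f (d.getD k d0))).contains c = false := by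
    rw [PySem.Dict.contains_insert]; simp [hc, Ne.symm hne]
  rw [PySem.Dict.items_insert_of_contains _ _ h1,
      PySem.Dict.items_insert_of_not_contains _ _ h2,
      PySem.Dict.items_insert_of_not_contains _ _ hc,
      PySem.Dict.items_insert_of_contains _ _ hk]
  simp [Ne.symm hne]

-- the fill loop does not look at a key the processed items never map to
theorem pv_fill_insert_iid (iid : PySem.Dict String Int) (ps : List (Int × String)) (vd : PySem.Dict Int (List Int))
    (it : String) (c : Int) (h : ∀ p ∈ ps, p.2 ≠ it) :
    pvFill (iid.insert it c) ps vd = pvFill iid ps vd := by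
  unfold pvFill
  apply PySem.List.foldl_congr_mem
  intro acc p hp
  rw [PySem.Dict.getD_insert_of_ne _ _ _ (h p hp)]

-- the fill loop commutes with appending a fresh all-zeros row
theorem pv_fill_insert_vd (iid : PySem.Dict String Int) (ps : List (Int × String)) (vd : PySem.Dict Int (List Int))
    (c : Int) (z : List Int)
    (hin : ∀ p ∈ ps, vd.contains (iid.getD p.2 0) = true)
    (hne : ∀ p ∈ ps, iid.getD p.2 0 ≠ c)
    (hc : vd.contains c = false) :
    pvFill iid ps (vd.insert c z) = (pvFill iid ps vd).insert c z := by
  induction ps generalizing vd with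
  | nil => rfl
  | cons p ps ih =>
    have hkin : vd.contains (iid.getD p.2 0) = true := hin p (by simp)
    have hkne : iid.getD p.2 0 ≠ c := hne p (by simp)
    simp only [pvFill, List.foldl_cons]
    rw [pv_modify_insert_comm vd _ c z [] _ hkin hc hkne]
    exact ih (vd.modify (iid.getD p.2 0) [] _)
      (fun q hq => by
        rw [PySem.Dict.contains_modify]
        simp [hin q (List.mem_cons_of_mem _ hq)])
      (fun q hq => hne q (List.mem_cons_of_mem _ hq))
      (by rw [PySem.Dict.contains_modify]
          have : (c == iid.getD p.2 0) = false := by simpa using Ne.symm hkne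
          simp [hc, this])

-- keys of a fold of inserts
theorem pv_contains_foldl_insert {ν : Type} (vs : List Int) (d : PySem.Dict Int ν) (x : Int → ν) (v : Int) :
    (vs.foldl (fun d id => d.insert id (x id)) d).contains v = (v ∈ vs || d.contains v) := by
  induction vs generalizing d with
  | nil => simp
  | cons a vs ih =>
    simp only [List.foldl_cons, ih, PySem.Dict.contains_insert]
    by_cases hva : v = a
    · simp [hva]
    · have : (v == a) = false := by simpa using hva
      simp [hva, this]

-- MAIN: B's single fold equals A's staged folds, over any flat pair stream
theorem pv_main (n : Int) (ps : List (Int × String)) :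
    pvCFold n ps = ((pvBFold ps).1, pvMkIdItem (pvBFold ps).1,
                    pvFill (pvBFold ps).1 ps (pvMkInit (pvBFold ps).1 n), (pvBFold ps).2) := by
  induction ps using List.reverseRecOn with
  | nil => rfl
  | append_singleton ps q ih =>
    obtain ⟨inv1, inv2⟩ := pvBFold_inv ps
    have hC : pvCFold n (ps ++ [q]) = pvCStep n (pvCFold n ps) q := by
      simp [pvCFold, List.foldl_append]
    have hFill : ∀ (iid : PySem.Dict String Int) vd, pvFill iid (ps ++ [q]) vd
        = (pvFill iid ps vd).modify (iid.getD q.2 0) [] (fun l => PySem.List.pySetD l q.1 1) := by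
      intro iid vd; simp [pvFill, List.foldl_append]
    by_cases hcont : (pvBFold ps).1.contains q.2 = true
    · have hb : pvBFold (ps ++ [q]) = pvBFold ps := by
        rw [pvBFold_step]; simp [pvBStep, hcont]
      rw [hC, ih, hb, hFill]
      simp [pvCStep, hcont]
    · have hfalse : (pvBFold ps).1.contains q.2 = false := by simpa using hcont
      have hb : pvBFold (ps ++ [q]) =
          ((pvBFold ps).1.insert q.2 (pvBFold ps).2, (pvBFold ps).2 + 1) := by
        rw [pvBFold_step]; simp [pvBStep, hfalse]
      rw [hC, ih, hb, hFill]
      simp only [pvCStep, hfalse, Bool.false_eq_true, if_false]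
      simp only [Prod.mk.injEq]
      have hitems : ((pvBFold ps).1.insert q.2 (pvBFold ps).2).items
          = (pvBFold ps).1.items ++ [(q.2, (pvBFold ps).2)] :=
        PySem.Dict.items_insert_of_not_contains _ _ hfalse
      have hvals : ((pvBFold ps).1.insert q.2 (pvBFold ps).2).values
          = (pvBFold ps).1.values ++ [(pvBFold ps).2] := by
        simp [PySem.Dict.values, hitems]
      have hkeys : ((pvBFold ps).1.insert q.2 (pvBFold ps).2).keys
          = (pvBFold ps).1.keys ++ [q.2] := by
        simp [PySem.Dict.keys, hitems]
      have hgd : ((pvBFold ps).1.insert q.2 (pvBFold ps).2).getD q.2 0 = (pvBFold ps).2 :=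
        PySem.Dict.getD_insert_self _ _ _ _
      refine ⟨trivial, ?_, ?_, trivial⟩
      · -- id_item component
        unfold pvMkIdItem
        rw [hvals, hkeys, List.zip_append (by simp [PySem.Dict.values, PySem.Dict.keys])]
        simp [List.foldl_append]
      · -- vertical_data component
        have hinit : pvMkInit ((pvBFold ps).1.insert q.2 (pvBFold ps).2) n
            = (pvMkInit (pvBFold ps).1 n).insert (pvBFold ps).2 (List.replicate n.toNat 0) := by
          unfold pvMkInit; rw [hvals, List.foldl_append]; rfl
        have hneq : ∀ p ∈ ps, p.2 ≠ q.2 := by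
          intro p hp heq
          rw [← heq] at hfalse
          rw [inv1 p hp] at hfalse
          exact Bool.noConfusion hfalse
        have hmemv : ∀ p ∈ ps, (pvBFold ps).1.getD p.2 0 ∈ (pvBFold ps).1.values :=
          fun p hp => pv_getD_mem_values _ _ _ (inv1 p hp)
        have hcontInit : ∀ p ∈ ps, (pvMkInit (pvBFold ps).1 n).contains ((pvBFold ps).1.getD p.2 0) = true := by
          intro p hp
          unfold pvMkInit
          rw [pv_contains_foldl_insert]
          simp [hmemv p hp]
        have hneC : ∀ p ∈ ps, (pvBFold ps).1.getD p.2 0 ≠ (pvBFold ps).2 := by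
          intro p hp
          have := inv2 _ (hmemv p hp); omega
        have hcFresh : (pvMkInit (pvBFold ps).1 n).contains (pvBFold ps).2 = false := by
          unfold pvMkInit
          rw [pv_contains_foldl_insert]
          have : (pvBFold ps).2 ∉ (pvBFold ps).1.values := fun hm => by
            have := inv2 _ hm; omega
          simp [this, PySem.Dict.contains_empty]
        rw [hgd, hinit, pv_fill_insert_iid _ _ _ _ _ hneq,
            pv_fill_insert_vd _ _ _ _ _ hcontInit hneC hcFresh]

-- ===== VERDICT (by name: the statement is the Claim_ definition above) =====
theorem convert_horizontal_to_vertical_spec : Claim_equal_convert_horizontal_to_vertical := by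
  intro tss n _ _
  unfold Spec_convert_horizontal_to_vertical
  have hA : convert_horizontal_to_vertical tss n =
      (let iid := (pvBFold (pvFlat tss)).1
       ((pvFill iid (pvFlat tss) (pvMkInit iid n)).items, (pvMkIdItem iid).items)) := by
    unfold convert_horizontal_to_vertical
    have hb := pv_build_eq_flat
      (fun (st : PySem.Dict String Int × Int) item =>
        if st.1.contains item then st else (st.1.insert item st.2, st.2 + 1)) tss (PySem.Dict.empty, 0)
    simp only []
    rw [show (tss.foldl
        (fun (st : PySem.Dict String Int × Int) transaction =>
          transaction.foldl
            (fun st item => if st.1.contains item then st else (st.1.insert item st.2, st.2 + 1)) st)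
        (PySem.Dict.empty, 0)) = pvBFold (pvFlat tss) from hb]
    exact congrArg
      (fun vd : PySem.Dict Int (List Int) => (vd.items, (pvMkIdItem (pvBFold (pvFlat tss)).1).items))
      (pv_nested_eq_flat
        (fun vd p => vd.modify ((pvBFold (pvFlat tss)).1.getD p.2 0) [] (fun l => PySem.List.pySetD l p.1 1))
        tss (pvMkInit (pvBFold (pvFlat tss)).1 n))
  have hB : convert_horizontal_to_vertical_alt tss n =
      (let st := pvCFold n (pvFlat tss); (st.2.2.1.items, st.2.1.items)) := by
    unfold convert_horizontal_to_vertical_alt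
    exact congrArg (fun st : PySem.Dict String Int × PySem.Dict Int String × PySem.Dict Int (List Int) × Int => (st.2.2.1.items, st.2.1.items))
      (pv_nested_eq_flat (pvCStep n) tss (PySem.Dict.empty, PySem.Dict.empty, PySem.Dict.empty, 0))
  rw [hA, hB, pv_main n (pvFlat tss)]
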